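-- pv_equiv track=rewrite | github.com/bomii1/Programmers | 06.25.py | solution
-- ===== SOURCE A (Python) =====
-- def solution(s, skip, index):
--     s = list(s)
--     for i in range(len(s)):
--         count = 0
--         for j in range(index):
--             for k in range(len(skip)):
--                 if chr(ord(s[i])+j+1) == skip[k]:
--
--                     count += 1
--         index_s = ord(s[i]) + index + count
--         if index_s > 122:
--             index_s -= 26
--         s[i] = chr(index_s)
--     return "".join(s)
-- ===== SOURCE B (Python) =====
-- def solution(s, skip, index):
--     # One range test per (char, skip-char) pair replaces A's enumeration of all
--     # `index` shifted characters: count = |{d in skip-codes : oc < d <= oc+index}|.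
--     skip_codes = [ord(ch) for ch in skip]
--     out = []
--     for c in s:
--         oc = ord(c)
--         v = oc + index + sum(1 for d in skip_codes if oc < d <= oc + index)
--         if v > 122:
--             v -= 26
--         out.append(chr(v))
--     return "".join(out)
-- ===== Notes on version B (the rewrite author's own statement) =====
-- stated objective: faster
-- what changed: A counts skip hits by enumerating every one of the `index` shifted characters per input character (triple loop); B counts, per input character, the skip characters whose code lies in the half-open interval (ord(c), ord(c)+index] with a single range test each, removing the factor `index` entirely.
import Mathlib
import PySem

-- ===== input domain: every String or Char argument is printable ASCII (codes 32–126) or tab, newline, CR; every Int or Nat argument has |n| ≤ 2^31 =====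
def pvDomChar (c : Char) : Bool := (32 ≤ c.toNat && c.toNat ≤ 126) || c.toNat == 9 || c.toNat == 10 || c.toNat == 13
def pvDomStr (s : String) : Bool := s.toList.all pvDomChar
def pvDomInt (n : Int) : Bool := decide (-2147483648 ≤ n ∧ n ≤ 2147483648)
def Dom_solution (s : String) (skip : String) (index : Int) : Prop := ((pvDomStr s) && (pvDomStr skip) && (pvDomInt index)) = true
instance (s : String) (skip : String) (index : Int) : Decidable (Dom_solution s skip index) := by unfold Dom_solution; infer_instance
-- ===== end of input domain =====

-- B replaces A's per-character enumeration of all `index` shifted characters (O(index·|skip|)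
-- per character) by one interval test per skip character (O(|skip|) per character); return
-- values agree on all of Pre_. A mutates only its local copy of s, so there is no observable
-- side effect to match.

-- chr(n): some ⟨n⟩ for a code point Lean's Char can represent, none where Python's chr raises
-- ValueError (n < 0 or n > 0x10FFFF) or yields a lone surrogate (no Lean Char exists for it);
-- Pre_solution keeps every chr argument both programs RETURN inside the `some` branch (a
-- surrogate produced only as an intermediate comparand compares unequal to every real Char,
-- exactly as the Python comparison is False there).
def pvChr (n : Int) : Option Char :=
  if 0 ≤ n ∧ n ≤ 1114111 ∧ ¬(55296 ≤ n ∧ n ≤ 57343) then some (Char.ofNat n.toNat) else none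

-- ===== PORT A =====
def solution (s : String) (skip : String) (index : Int) : String :=
  let skipL := skip.toList
  String.ofList (s.toList.map (fun c =>
    let oc : Int := c.toNat
    let count : Int := (PySem.List.pyRange 0 index 1).foldl
      (fun count j => skipL.foldl
        (fun count ch => if pvChr (oc + j + 1) == some ch then count + 1 else count) count) 0
    let index_s := oc + index + count
    let index_s := if index_s > 122 then index_s - 26 else index_s
    (pvChr index_s).getD (Char.ofNat 0)))

-- ===== PORT B =====
def solution_alt (s : String) (skip : String) (index : Int) : String :=
  let skipCodes : List Int := skip.toList.map (fun ch => (ch.toNat : Int))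
  String.ofList (s.toList.map (fun c =>
    let oc : Int := c.toNat
    let v := oc + index + ((skipCodes.filter (fun d => oc < d && d ≤ oc + index)).length : Int)
    let v := if v > 122 then v - 26 else v
    (pvChr v).getD (Char.ofNat 0)))

-- ===== PRECONDITION & SPEC =====
-- Pre_ excludes exactly (per input character, with cnt the multiplicity of skip codes in the
-- shift interval — the count both programs add): the inputs where Python's chr raises
-- ValueError (an intermediate code above 0x10FFFF when index > 0, or a final code outside
-- [0, 0x10FFFF]), on which A returns nothing, and the inputs whose final code lands in the
-- lone-surrogate range 0xD800–0xDFFF: there both Pythons return the SAME one-surrogate str,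
-- but that value is not representable as a Lean Char/String, so no Lean claim can state it.
def Pre_solution (s : String) (skip : String) (index : Int) : Prop :=
  (s.toList.all (fun c =>
    let oc : Int := c.toNat
    let cnt : Int := (skip.toList.countP
      (fun ch => decide (oc < (ch.toNat : Int) ∧ (ch.toNat : Int) ≤ oc + index)) : Int)
    let t := oc + index + cnt
    let f := if t > 122 then t - 26 else t
    (decide (0 < index) → decide (oc + index ≤ 1114111)) &&
    (0 ≤ f && f ≤ 1114111 && !(55296 ≤ f && f ≤ 57343)))) = true
instance (s : String) (skip : String) (index : Int) : Decidable (Pre_solution s skip index) := by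
  unfold Pre_solution; infer_instance

def pvWitness_solution : String × String × Int := ("aA zy", "qzr", 7)

def Spec_solution (s : String) (skip : String) (index : Int) (out : String) : Prop := out = solution_alt s skip index
instance (s : String) (skip : String) (index : Int) (out : String) : Decidable (Spec_solution s skip index out) := by unfold Spec_solution; infer_instance

-- ===== CLAIM (what is proved, stated in full; the proofs are below) =====
def Claim_equal_solution : Prop := ∀ (s : String) (skip : String) (index : Int), Dom_solution s skip index → Pre_solution s skip index → Spec_solution s skip index (solution s skip index)

-- ===== LEMMAS AND PROOFS =====

-- comparing chr(n) with an existing character is exactly a comparison of code points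
theorem pvChr_beq_some (n : Int) (ch : Char) :
    (pvChr n == some ch) = decide (n = (ch.toNat : Int)) := by
  have hv : ch.val.toNat.isValidChar := ch.valid
  have hvn : Char.toNat ch = ch.val.toNat := rfl
  unfold pvChr
  split
  · rename_i h
    have hval : n.toNat.isValidChar := by
      rcases h with ⟨h0, h1, h2⟩
      unfold Nat.isValidChar
      omega
    have htn : (Char.ofNat n.toNat).toNat = n.toNat := by
      simp [Char.ofNat, hval, Char.toNat, Char.ofNatAux]
    by_cases he : n = (ch.toNat : Int)
    · have h3 : n.toNat = ch.toNat := by omega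
      have : Char.ofNat n.toNat = ch := by rw [h3, Char.ofNat_toNat]
      simp [this, he]
    · have : Char.ofNat n.toNat ≠ ch := by
        intro hc
        apply he
        rw [← hc, hvn] at *
        omega
      simp [this, he]
  · rename_i h
    have : n ≠ (ch.toNat : Int) := by
      intro he; apply h; rw [he, hvn]
      unfold Nat.isValidChar at hv
      rcases hv with h' | h' <;> refine ⟨by omega, by omega, by omega⟩
    simp [this]

-- A's inner k-loop counts the occurrences of chr(n) in skip
theorem foldl_countChr (L : List Char) (n : Int) (a : Int) :
    L.foldl (fun acc ch => if pvChr n == some ch then acc + 1 else acc) a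
      = a + (L.countP (fun ch => decide ((ch.toNat : Int) = n)) : Int) := by
  induction L generalizing a with
  | nil => simp
  | cons ch tl ih =>
    rw [List.foldl_cons, ih, List.countP_cons, pvChr_beq_some]
    by_cases he : n = (ch.toNat : Int)
    · simp [he]; push_cast; ring
    · have he' : ¬ ((ch.toNat : Int) = n) := fun h' => he h'.symm
      simp [he, he']

-- splitting the interval filter at its right end
theorem filter_interval_succ (M : List Int) (oc : Int) (n : Nat) :
    ((M.filter (fun d => oc < d && d ≤ oc + ((n : Int) + 1))).length : Int)
      = ((M.filter (fun d => oc < d && d ≤ oc + (n : Int))).length : Int)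
        + (M.countP (fun d => decide (d = oc + (n : Int) + 1)) : Int) := by
  induction M with
  | nil => simp
  | cons d tl ih =>
    simp only [List.filter_cons, List.countP_cons]
    by_cases h1 : oc < d ∧ d ≤ oc + (n : Int) + 1
    · by_cases h2 : d = oc + (n : Int) + 1
      · have h3 : ¬ (oc < d ∧ d ≤ oc + (n : Int)) := by omega
        simp only [show oc + ((n : Int) + 1) = oc + (n : Int) + 1 by ring] at *
        simp [h1.1, h1.2, h3, h2]
        omega
      · have h3 : oc < d ∧ d ≤ oc + (n : Int) := by omega
        simp only [show oc + ((n : Int) + 1) = oc + (n : Int) + 1 by ring] at *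
        simp [h1.1, h1.2, h3.1, h3.2, h2]
        omega
    · have h2 : ¬ (oc < d ∧ d ≤ oc + (n : Int)) := by omega
      have h3 : ¬ (d = oc + (n : Int) + 1) := by omega
      simp only [show oc + ((n : Int) + 1) = oc + (n : Int) + 1 by ring] at *
      rcases Decidable.not_and_iff_not_or_not.mp h1 with h | h <;>
      rcases Decidable.not_and_iff_not_or_not.mp h2 with h' | h' <;>
        simp [h, h', h3] <;> omega

-- the per-character count of A equals the per-character interval count of B
theorem count_eq (L : List Char) (oc : Int) (index : Int) :
    (PySem.List.pyRange 0 index 1).foldl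
        (fun acc j => L.foldl
          (fun acc ch => if pvChr (oc + j + 1) == some ch then acc + 1 else acc) acc) 0
      = (((L.map (fun ch => (ch.toNat : Int))).filter
          (fun d => oc < d && d ≤ oc + index)).length : Int) := by
  by_cases hle : index ≤ 0
  · rw [PySem.List.pyRange_one_eq_nil hle]
    have : (L.map (fun ch => (ch.toNat : Int))).filter (fun d => oc < d && d ≤ oc + index) = [] := by
      apply List.filter_eq_nil_iff.mpr
      intro d _
      simp only [Bool.and_eq_true, decide_eq_true_eq, not_and]
      omega
    simp [this]
  · obtain ⟨n, hn⟩ : ∃ n : Nat, index = (n : Int) :=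
      ⟨index.toNat, (Int.toNat_of_nonneg (by omega)).symm⟩
    subst hn
    clear hle
    induction n with
    | zero =>
      rw [show ((0:Nat) : Int) = 0 by rfl, PySem.List.pyRange_one_eq_nil (by omega)]
      simp only [add_zero, List.foldl_nil]
      have : (L.map (fun ch => (ch.toNat : Int))).filter (fun d => oc < d && d ≤ oc) = [] := by
        apply List.filter_eq_nil_iff.mpr
        intro d _
        simp only [Bool.and_eq_true, decide_eq_true_eq, not_and]
        omega
      rw [this]
      simp
    | succ n ih =>
      have hsplit : PySem.List.pyRange 0 ((n : Int) + 1) 1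
          = PySem.List.pyRange 0 (n : Int) 1 ++ [(n : Int)] :=
        PySem.List.pyRange_one_succ_right (by omega)
      push_cast
      rw [hsplit, List.foldl_append, ih, List.foldl_cons, List.foldl_nil,
          foldl_countChr, filter_interval_succ, List.countP_map]
      congr 1

-- per-character equality of the two programs
theorem perChar_eq (skip : String) (index : Int) (c : Char) :
    (let oc : Int := c.toNat
     let count : Int := (PySem.List.pyRange 0 index 1).foldl
       (fun count j => skip.toList.foldl
         (fun count ch => if pvChr (oc + j + 1) == some ch then count + 1 else count) count) 0
     let index_s := oc + index + count
     let index_s := if index_s > 122 then index_s - 26 else index_s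
     (pvChr index_s).getD (Char.ofNat 0))
    = (let oc : Int := c.toNat
       let v := oc + index + (((skip.toList.map (fun ch => (ch.toNat : Int))).filter
         (fun d => oc < d && d ≤ oc + index)).length : Int)
       let v := if v > 122 then v - 26 else v
       (pvChr v).getD (Char.ofNat 0)) := by
  simp only
  rw [count_eq]

-- ===== VERDICT (by name: the statement is the Claim_ definition above) =====
theorem solution_spec : Claim_equal_solution := by
  intro s skip index _ _
  unfold Spec_solution solution solution_alt
  simp only
  congr 1
  apply List.map_congr_left
  intro c _
  exact perChar_eq skip index c
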